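-- pv_equiv track=rewrite | github.com/Tomi-Beep/artificial-intelligence | exam_problems/constraint_satisfaction_problems/03_trees_and_tents.py | areNotNeighbors
-- ===== SOURCE A (Python) =====
-- def areNotNeighbors(tent1, tent2):
--     skros = True
--     x1, y1 = tent1
--     x2, y2 = tent2
--     for i in [-1, 0, 1]:
--         for j in [-1, 0, 1]:
--             if x1 + i == x2 and y1 + j == y2:
--                 skros = False
--                 break
--     return skros
-- ===== SOURCE B (Python) =====
-- def areNotNeighbors(tent1, tent2):
--     x1, y1 = tent1
--     x2, y2 = tent2
--     return not ((x2 - x1) in (-1, 0, 1) and (y2 - y1) in (-1, 0, 1))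
-- ===== Notes on version B (the rewrite author's own statement) =====
-- stated objective: simpler
-- what changed: Replaces the nested 3x3 offset loop with a direct membership test of the coordinate differences in {-1,0,1}.
import Mathlib
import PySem

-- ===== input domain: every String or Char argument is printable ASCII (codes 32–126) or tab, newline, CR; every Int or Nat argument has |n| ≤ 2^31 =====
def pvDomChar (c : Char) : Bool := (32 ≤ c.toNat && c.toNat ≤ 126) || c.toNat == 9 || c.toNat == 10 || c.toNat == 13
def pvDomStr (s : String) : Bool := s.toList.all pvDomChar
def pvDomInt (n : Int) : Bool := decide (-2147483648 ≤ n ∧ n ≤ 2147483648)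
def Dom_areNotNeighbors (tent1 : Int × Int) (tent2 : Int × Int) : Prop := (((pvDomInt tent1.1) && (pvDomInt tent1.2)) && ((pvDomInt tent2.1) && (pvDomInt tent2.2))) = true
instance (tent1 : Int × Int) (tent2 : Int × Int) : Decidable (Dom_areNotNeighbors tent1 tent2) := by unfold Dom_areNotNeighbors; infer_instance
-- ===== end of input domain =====

-- B replaces A's nested 3x3 loop by a direct membership test of the coordinate differences in {-1,0,1} (simpler).

-- ===== PORT A =====
-- inner 'for j' loop: break on the first matching offset (sets skros = false and stops)
def areNotNeighborsInner (x1 y1 x2 y2 i : Int) : List Int → Bool → Bool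
  | [], skros => skros
  | j :: js, skros =>
    if x1 + i == x2 && y1 + j == y2 then false
    else areNotNeighborsInner x1 y1 x2 y2 i js skros

def areNotNeighbors (tent1 : Int × Int) (tent2 : Int × Int) : Bool :=
  let x1 := tent1.1; let y1 := tent1.2
  let x2 := tent2.1; let y2 := tent2.2
  ([-1, 0, 1] : List Int).foldl
    (fun skros i => areNotNeighborsInner x1 y1 x2 y2 i [-1, 0, 1] skros) true

-- ===== PORT B =====
def areNotNeighbors_alt (tent1 : Int × Int) (tent2 : Int × Int) : Bool :=
  let x1 := tent1.1; let y1 := tent1.2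
  let x2 := tent2.1; let y2 := tent2.2
  !(((x2 - x1) ∈ ([-1, 0, 1] : List Int)) && ((y2 - y1) ∈ ([-1, 0, 1] : List Int)))

-- ===== PRECONDITION & SPEC =====
def Spec_areNotNeighbors (tent1 : Int × Int) (tent2 : Int × Int) (out : Bool) : Prop := out = areNotNeighbors_alt tent1 tent2
instance (tent1 : Int × Int) (tent2 : Int × Int) (out : Bool) : Decidable (Spec_areNotNeighbors tent1 tent2 out) := by unfold Spec_areNotNeighbors; infer_instance

-- ===== CLAIM (what is proved, stated in full; the proofs are below) =====
def Claim_equal_areNotNeighbors : Prop := ∀ (tent1 : Int × Int) (tent2 : Int × Int), Dom_areNotNeighbors tent1 tent2 → Spec_areNotNeighbors tent1 tent2 (areNotNeighbors tent1 tent2)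

-- ===== LEMMAS AND PROOFS =====

-- ===== VERDICT (by name: the statement is the Claim_ definition above) =====
theorem areNotNeighbors_spec : Claim_equal_areNotNeighbors := by
  intro ⟨x1, y1⟩ ⟨x2, y2⟩ _
  unfold Spec_areNotNeighbors areNotNeighbors areNotNeighbors_alt
  simp only [List.foldl, areNotNeighborsInner]
  split_ifs <;> simp_all <;> omega
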